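-- pv_equiv track=rewrite | github.com/PabloBondia/sa-bwt-exact-matching-Prefix-Doubling-SA-and-BWT-Search-in-Python.- | src/bwt.py | build_occ_table
-- ===== SOURCE A (Python) =====
-- def build_occ_table(bwt):
--     """
--     Build the Occ table for FM-index.
--
--     Occ[c][i] = number of occurrences of character c in BWT[0:i].
--     Time complexity: O(σn) where σ is alphabet size and n is text length.
--     Space complexity: O(σn).
--
--     Args:
--         bwt (str): The BWT string.
--
--     Returns:
--         dict: Occ table - dict mapping each character to a list of cumulative counts.
--     """
--     n = len(bwt)
--
--     # Get all unique characters in BWT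
--     alphabet = sorted(set(bwt))
--
--     # Initialize Occ table
--     occ = {c: [0] * (n + 1) for c in alphabet}
--
--     # Build Occ table
--     for i in range(n):
--         # Copy previous counts
--         for c in alphabet:
--             occ[c][i + 1] = occ[c][i]
--         # Increment count for current character
--         occ[bwt[i]][i + 1] += 1
--
--     return occ
-- ===== SOURCE B (Python) =====
-- def build_occ_table(bwt):
--     # Character-major: one running counter per character, one pass over bwt each.
--     occ = {}
--     for c in sorted(set(bwt)):
--         counts = [0]
--         run = 0
--         for ch in bwt:
--             if ch == c:
--                 run += 1
--             counts.append(run)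
--         occ[c] = counts
--     return occ
-- ===== Notes on version B (the rewrite author's own statement) =====
-- stated objective: faster
-- what changed: Replaced the position-major loop that copies all sigma previous counts per position (with per-step dict/list index assignments) by a character-major pass: for each character one running integer counter appended along a single scan of bwt.
import Mathlib
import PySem

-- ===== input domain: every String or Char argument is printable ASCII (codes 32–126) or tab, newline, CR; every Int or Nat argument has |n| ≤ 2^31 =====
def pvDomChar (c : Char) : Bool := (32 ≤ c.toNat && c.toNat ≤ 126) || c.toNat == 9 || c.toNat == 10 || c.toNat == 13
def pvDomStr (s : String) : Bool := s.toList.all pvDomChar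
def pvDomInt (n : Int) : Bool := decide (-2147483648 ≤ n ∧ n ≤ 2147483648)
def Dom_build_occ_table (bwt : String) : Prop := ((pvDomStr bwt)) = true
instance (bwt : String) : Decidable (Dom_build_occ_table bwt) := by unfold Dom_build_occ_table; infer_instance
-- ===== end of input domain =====

-- B replaces A's position-major loop (copy all σ previous counts, then bump one) by a
-- character-major pass with one running counter per character; same O(σ·n) bound, measurably faster by constant factor.

-- ===== PORT A =====
-- Python dict keyed by single characters; the port keeps Char keys internally and renders
-- them as one-character Strings in the returned association list.
def build_occ_table (bwt : String) : List (String × List Int) :=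
  let l := bwt.toList
  let n := l.length
  let alphabet := PySem.List.sorted (PySem.Set.ofList l) (fun x => x) false
  -- occ = {c: [0] * (n + 1) for c in alphabet}
  let occ0 : PySem.Dict Char (List Int) :=
    alphabet.foldl (fun d c => d.insert c (List.replicate (n+1) (0:Int))) PySem.Dict.empty
  -- for i in range(n): …   (the indices i and i+1 are always in range: lists have length n+1)
  let occ := (List.range n).foldl (fun d i =>
      let d := alphabet.foldl (fun d c =>
          d.modify c [] (fun v => v.set (i+1) (v.getD i 0))) d
      d.modify (l.getD i 'a') [] (fun v => v.set (i+1) (v.getD (i+1) 0 + 1))) occ0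
  occ.items.map (fun q => (String.mk [q.1], q.2))

-- ===== PORT B =====
def build_occ_table_alt (bwt : String) : List (String × List Int) :=
  (PySem.List.sorted (PySem.Set.ofList bwt.toList) (fun x => x) false).map (fun c =>
    (String.mk [c],
      (bwt.toList.foldl (fun (st : List Int × Int) ch =>
          let run := if ch == c then st.2 + 1 else st.2
          (st.1 ++ [run], run)) ([0], 0)).1))

-- ===== PRECONDITION & SPEC =====
def Spec_build_occ_table (bwt : String) (out : List (String × List Int)) : Prop := out = build_occ_table_alt bwt
instance (bwt : String) (out : List (String × List Int)) : Decidable (Spec_build_occ_table bwt out) := by unfold Spec_build_occ_table; infer_instance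

-- ===== CLAIM (what is proved, stated in full; the proofs are below) =====
def Claim_equal_build_occ_table : Prop := ∀ (bwt : String), Dom_build_occ_table bwt → Spec_build_occ_table bwt (build_occ_table bwt)

-- ===== LEMMAS AND PROOFS =====

-- B's running-counter fold (first component = prefix-count list, second = running count)
def pvStep (c : Char) (st : List Int × Int) (ch : Char) : List Int × Int :=
  let run := if ch == c then st.2 + 1 else st.2
  (st.1 ++ [run], run)

def pvC (c : Char) (p : List Char) : List Int := (p.foldl (pvStep c) ([0], 0)).1

-- plain-list helpers: read/write at the length of the left part of an append
lemma pvGetD_append_lt {α : Type} [Inhabited α] (P R : List α) (i : ℕ) (d : α) (h : i < P.length) :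
    (P ++ R).getD i d = P.getD i d := by
  rw [List.getD_eq_getElem?_getD, List.getD_eq_getElem?_getD, List.getElem?_append_left h]

lemma pvGetD_append_len {α : Type} [Inhabited α] (P R : List α) (a : α) (d : α) :
    (P ++ a :: R).getD P.length d = a := by
  rw [List.getD_eq_getElem?_getD, List.getElem?_append_right (le_refl _)]
  simp

lemma pvSet_append_len {α : Type} (P R : List α) (a b : α) :
    (P ++ a :: R).set P.length b = P ++ b :: R := by
  induction P with
  | nil => simp
  | cons x t ih => simp [ih]

lemma pvFold_snd (c : Char) (p : List Char) (a : List Int) (r : Int) :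
    (p.foldl (pvStep c) (a, r)).2 = r + (p.count c : Int) := by
  induction p generalizing a r with
  | nil => simp
  | cons ch t ih =>
    simp only [List.foldl_cons, pvStep, List.count_cons]
    by_cases h : ch = c
    · simp [h, ih]; push_cast; ring
    · have hb : (ch == c) = false := by simp [h]
      simp [hb, ih, h]

lemma pvC_append (c : Char) (p : List Char) (x : Char) :
    pvC c (p ++ [x]) = pvC c p ++ [(p.count c : Int) + (if x == c then 1 else 0)] := by
  unfold pvC
  rw [List.foldl_append]
  have h2 := pvFold_snd c p ([0] : List Int) 0
  simp only [List.foldl_cons, List.foldl_nil, pvStep]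
  rw [h2]
  by_cases h : x = c <;> simp [h] <;> ring_nf

lemma pvC_length (c : Char) (p : List Char) : (pvC c p).length = p.length + 1 := by
  induction p using List.reverseRecOn with
  | nil => simp [pvC]
  | append_singleton q x ih => rw [pvC_append]; simp [ih]

lemma pvC_getD_last (c : Char) (p : List Char) (d : Int) :
    (pvC c p).getD p.length d = (p.count c : Int) := by
  induction p using List.reverseRecOn with
  | nil => simp [pvC]
  | append_singleton q x ih =>
    rw [pvC_append]
    have hl : (pvC c q).length = q.length + 1 := pvC_length c q
    have hL : (q ++ [x]).length = (pvC c q).length := by simp [hl]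
    have hg := pvGetD_append_len (pvC c q) ([] : List Int)
        ((q.count c : Int) + if x == c then 1 else 0) d
    rw [hL, hg]
    by_cases h : x = c
    · simp [h, List.count_append]
    · have hb : (x == c) = false := beq_eq_false_iff_ne.mpr h
      simp [hb, List.count_append, h]

-- Dict lemmas on a dict of shape  mk (al.map fun c => (c, g c))
lemma pvGet?_map (al : List Char) (g : Char → List Int) (c0 : Char) (h : c0 ∈ al) :
    (PySem.Dict.mk (al.map fun c => (c, g c))).get? c0 = some (g c0) := by
  induction al with
  | nil => simp at h
  | cons a t ih =>
    simp only [List.map_cons, PySem.Dict.get?_mk_cons]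
    by_cases ha : a = c0
    · simp [ha]
    · have hb : (a == c0) = false := by simp [ha]
      simp only [hb, if_false]
      cases List.mem_cons.mp h with
      | inl he => exact absurd he.symm ha
      | inr ht => exact ih ht

lemma pvContains_map (al : List Char) (g : Char → List Int) (c0 : Char) (h : c0 ∈ al) :
    (PySem.Dict.mk (al.map fun c => (c, g c))).contains c0 = true := by
  simp only [PySem.Dict.contains, PySem.Dict.items, List.any_eq_true]
  exact ⟨(c0, g c0), List.mem_map_of_mem h, by simp⟩

lemma pvModify_map (al : List Char) (g : Char → List Int) (c0 : Char)
    (f : List Int → List Int) (h : c0 ∈ al) :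
    (PySem.Dict.mk (al.map fun c => (c, g c))).modify c0 [] f
      = PySem.Dict.mk (al.map fun c => (c, if c = c0 then f (g c) else g c)) := by
  simp only [PySem.Dict.modify, PySem.Dict.getD, pvGet?_map al g c0 h, Option.getD_some,
    PySem.Dict.insert, pvContains_map al g c0 h, if_true]
  congr 1
  rw [List.map_map]
  apply List.map_congr_left
  intro c _
  by_cases hc : c = c0
  · subst hc; simp
  · have hb : (c == c0) = false := by simp [hc]
    simp [Function.comp, hb, hc]

lemma pvFoldl_modify_all (cs al : List Char) (F : List Int → List Int) (g : Char → List Int)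
    (hsub : ∀ c ∈ cs, c ∈ al) (hnd : cs.Nodup) :
    cs.foldl (fun d c => d.modify c [] F) (PySem.Dict.mk (al.map fun c => (c, g c)))
      = PySem.Dict.mk (al.map fun c => (c, if c ∈ cs then F (g c) else g c)) := by
  induction cs generalizing g with
  | nil => simp
  | cons c0 t ih =>
    simp only [List.foldl_cons]
    rw [pvModify_map al g c0 F (hsub c0 (by simp))]
    rw [ih _ (fun c hc => hsub c (by simp [hc])) hnd.of_cons]
    congr 1
    apply List.map_congr_left
    intro c _
    by_cases h1 : c = c0
    · subst h1
      have : c ∉ t := (List.nodup_cons.mp hnd).1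
      simp [this]
    · by_cases h2 : c ∈ t <;> simp [h1, h2]

lemma pvFoldl_insert_aux (cs : List Char) (v : Char → List Int) (d : PySem.Dict Char (List Int))
    (h : ∀ c ∈ cs, d.contains c = false) (hnd : cs.Nodup) :
    cs.foldl (fun d c => d.insert c (v c)) d
      = PySem.Dict.mk (d.items ++ cs.map fun c => (c, v c)) := by
  induction cs generalizing d with
  | nil => apply PySem.Dict.ext; simp
  | cons c0 t ih =>
    simp only [List.foldl_cons, List.map_cons]
    have hc0 : d.contains c0 = false := h c0 (by simp)
    have hins : d.insert c0 (v c0) = PySem.Dict.mk (d.items ++ [(c0, v c0)]) := by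
      simp [PySem.Dict.insert, hc0]
    have hfr : ∀ c ∈ t, (PySem.Dict.mk (d.items ++ [(c0, v c0)])).contains c = false := by
      intro c hc
      have hne : c ≠ c0 := fun he => (List.nodup_cons.mp hnd).1 (he ▸ hc)
      have hdc := h c (by simp [hc])
      simp only [PySem.Dict.contains, PySem.Dict.items, List.any_append] at hdc ⊢
      simp [hdc, Ne.symm hne]
    rw [hins, ih _ hfr hnd.of_cons]
    simp

lemma pvFoldl_insert_fresh (cs : List Char) (v : Char → List Int) (hnd : cs.Nodup) :
    cs.foldl (fun d c => d.insert c (v c)) PySem.Dict.empty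
      = PySem.Dict.mk (cs.map fun c => (c, v c)) := by
  rw [pvFoldl_insert_aux cs v PySem.Dict.empty (fun c _ => rfl) hnd]
  simp [PySem.Dict.empty]

-- one step of A's outer loop, and the whole loop, over the dict in mapped form
lemma pvA_loop (l al : List Char) (hnd : al.Nodup) (hal : ∀ x ∈ l, x ∈ al)
    (k : ℕ) (hk : k ≤ l.length) :
    (List.range k).foldl
      (fun d i =>
        (al.foldl (fun d c => d.modify c [] (fun v => v.set (i+1) (v.getD i 0))) d).modify
          (l.getD i 'a') [] (fun v => v.set (i+1) (v.getD (i+1) 0 + 1)))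
      (PySem.Dict.mk (al.map fun c => (c, List.replicate (l.length+1) (0:Int))))
    = PySem.Dict.mk (al.map fun c => (c, pvC c (l.take k) ++ List.replicate (l.length - k) (0:Int))) := by
  induction k with
  | zero => simp [pvC, List.replicate_succ]
  | succ k ih =>
    have hk' : k < l.length := hk
    rw [List.range_succ, List.foldl_append]
    rw [ih (le_of_lt hk')]
    simp only [List.foldl_cons, List.foldl_nil]
    set p := l.take k with hp
    have hpl : p.length = k := by simp [hp]; omega
    set x := l.getD k 'a' with hx
    have hxe : x = l[k] := by rw [hx, List.getD_eq_getElem l 'a' hk']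
    have hxl : x ∈ l := hxe ▸ List.getElem_mem hk'
    have htake : l.take (k+1) = p ++ [x] := by
      rw [hp, List.take_succ, hxe]
      simp [List.getElem?_eq_getElem hk']
    -- the value of every entry after the inner copy loop
    have hsucc : l.length - k = (l.length - (k+1)) + 1 := by omega
    have hval : ∀ c : Char,
        (pvC c p ++ List.replicate (l.length - k) (0:Int)).set (k+1)
          ((pvC c p ++ List.replicate (l.length - k) (0:Int)).getD k 0)
        = pvC c p ++ ((p.count c : Int) :: List.replicate (l.length - (k+1)) 0) := by
      intro c
      have hlen : (pvC c p).length = k + 1 := by rw [pvC_length, hpl]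
      have hg : (pvC c p ++ List.replicate (l.length - k) (0:Int)).getD k 0 = (p.count c : Int) := by
        rw [pvGetD_append_lt _ _ _ _ (by omega)]
        have := pvC_getD_last c p (0:Int); rwa [hpl] at this
      rw [hg, hsucc, List.replicate_succ]
      have := pvSet_append_len (pvC c p) (List.replicate (l.length - (k+1)) (0:Int)) 0 (p.count c : Int)
      rwa [hlen] at this
    rw [pvFoldl_modify_all al al _ _ (fun c hc => hc) hnd]
    have hmid : (al.map fun c => (c, if c ∈ al then
          ((pvC c p ++ List.replicate (l.length - k) (0:Int)).set (k+1)
            ((pvC c p ++ List.replicate (l.length - k) (0:Int)).getD k 0))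
          else pvC c p ++ List.replicate (l.length - k) (0:Int)))
        = al.map fun c => (c, pvC c p ++ ((p.count c : Int) :: List.replicate (l.length - (k+1)) 0)) := by
      apply List.map_congr_left
      intro c hc
      simp only [hc, if_true, hval c]
    rw [hmid]
    rw [pvModify_map al _ x _ (hal x hxl)]
    congr 1
    apply List.map_congr_left
    intro c _
    have hlen : (pvC c p).length = k + 1 := by rw [pvC_length, hpl]
    have hCt : pvC c (l.take (k+1)) = pvC c p ++ [(p.count c : Int) + (if x == c then 1 else 0)] := by
      rw [htake, pvC_append]
    by_cases hcx : c = x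
    · have hb : (x == c) = true := by simp [hcx]
      have hget : (pvC c p ++ ((p.count c : Int) :: List.replicate (l.length - (k+1)) 0)).getD (k+1) 0
          = (p.count c : Int) := by
        have := pvGetD_append_len (pvC c p) (List.replicate (l.length - (k+1)) (0:Int)) (p.count c : Int) 0
        rwa [hlen] at this
      have hset := pvSet_append_len (pvC c p) (List.replicate (l.length - (k+1)) (0:Int))
          ((p.count c : Int)) ((p.count c : Int) + 1)
      rw [hlen] at hset
      simp only [if_pos hcx, hget, hset, hCt, hb, if_true]
      simp
    · have hb : (x == c) = false := beq_eq_false_iff_ne.mpr (Ne.symm hcx)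
      simp only [if_neg hcx, hCt, hb]
      simp

-- ===== VERDICT =====
theorem build_occ_table_spec : Claim_equal_build_occ_table := by
  unfold Claim_equal_build_occ_table Spec_build_occ_table
  intro bwt _
  unfold build_occ_table build_occ_table_alt
  set l := bwt.toList with hl
  set al := PySem.List.sorted (PySem.Set.ofList l) (fun x => x) false with hal
  have hnd : al.Nodup :=
    ((PySem.List.sorted_perm (PySem.Set.ofList l) (fun x => x) false).symm).nodup
      (PySem.Set.nodup_ofList l)
  have hmem : ∀ x ∈ l, x ∈ al := by
    intro x hx
    rw [hal, PySem.List.mem_sorted, PySem.Set.mem_ofList]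
    exact hx
  simp only
  rw [pvFoldl_insert_fresh al _ hnd]
  rw [pvA_loop l al hnd hmem l.length (le_refl _)]
  simp only [List.take_length, Nat.sub_self, List.replicate_zero, List.append_nil,
    PySem.Dict.items, List.map_map]
  apply List.map_congr_left
  intro c _
  rfl
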